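-- pv_equiv track=rewrite | github.com/Amisha-Ananda-Gowda/Python-Programs | lab7b.py | Authenitcate_Password
-- ===== SOURCE A (Python) =====
-- def Authenitcate_Password(input):
--     has_letter = False
--     has_number = False
--
--     for x in input:
--       if x.isalnum():
--         if x.isalpha():
--           has_letter = True
--         elif x.isnumeric():
--           has_number = True
--       else:
--         return False
--     if has_letter and has_number:
--       return True
--     else:
--       return False
-- ===== SOURCE B (Python) =====
-- def Authenitcate_Password(input):
--     return (all(c.isalnum() for c in input)
--             and any(c.isalpha() for c in input)
--             and any(c.isnumeric() for c in input))
-- ===== Notes on version B (the rewrite author's own statement) =====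
-- stated objective: idiomatic
-- what changed: The single flag-carrying loop with an early return is replaced by a conjunction of three independent all/any generator scans.
import Mathlib
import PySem

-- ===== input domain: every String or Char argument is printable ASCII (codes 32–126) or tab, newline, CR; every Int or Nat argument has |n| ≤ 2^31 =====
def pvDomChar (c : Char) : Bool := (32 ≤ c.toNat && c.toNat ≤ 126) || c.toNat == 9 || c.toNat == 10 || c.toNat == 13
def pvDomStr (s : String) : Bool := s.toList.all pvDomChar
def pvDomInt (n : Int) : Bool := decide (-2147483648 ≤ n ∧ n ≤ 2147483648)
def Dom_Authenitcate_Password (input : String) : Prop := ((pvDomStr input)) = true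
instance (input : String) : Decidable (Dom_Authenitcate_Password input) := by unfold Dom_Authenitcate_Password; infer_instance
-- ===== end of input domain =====

-- B replaces A's single flag-carrying loop by three independent all/any scans (idiomatic).
-- ===== PORT A =====
-- the for-loop with flags and early return; on the ASCII domain x.isnumeric() = PySem.Chars.isdigit (exact there)
def pvLoopA : List Char → Bool → Bool → Bool
  | [], has_letter, has_number => has_letter && has_number
  | x :: xs, has_letter, has_number =>
      if PySem.Chars.isalnum x then
        if PySem.Chars.isalpha x then pvLoopA xs true has_number
        else if PySem.Chars.isdigit x then pvLoopA xs has_letter true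
        else pvLoopA xs has_letter has_number
      else false

def Authenitcate_Password (input : String) : Bool :=
  pvLoopA input.toList false false

-- ===== PORT B =====
-- all(c.isalnum()) and any(c.isalpha()) and any(c.isnumeric()); isnumeric = isdigit on ASCII
def Authenitcate_Password_alt (input : String) : Bool :=
  input.toList.all PySem.Chars.isalnum && input.toList.any PySem.Chars.isalpha
    && input.toList.any PySem.Chars.isdigit

-- ===== PRECONDITION & SPEC =====
def Spec_Authenitcate_Password (input : String) (out : Bool) : Prop := out = Authenitcate_Password_alt input
instance (input : String) (out : Bool) : Decidable (Spec_Authenitcate_Password input out) := by unfold Spec_Authenitcate_Password; infer_instance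

-- ===== CLAIM (what is proved, stated in full; the proofs are below) =====
def Claim_equal_Authenitcate_Password : Prop := ∀ (input : String), Dom_Authenitcate_Password input → Spec_Authenitcate_Password input (Authenitcate_Password input)

-- ===== LEMMAS AND PROOFS =====

-- ===== VERDICT (by name: the statement is the Claim_ definition above) =====
-- a letter is never a digit (character ranges are disjoint)
theorem pv_not_digit_of_alpha (c : Char) (h2 : PySem.Chars.isalpha c = true) :
    PySem.Chars.isdigit c = false := by
  unfold PySem.Chars.isalpha PySem.Chars.isupper PySem.Chars.islower PySem.Chars.isdigit at *
  simp only [Bool.or_eq_true, Bool.and_eq_true, decide_eq_true_eq] at h2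
  simp only [Bool.and_eq_false_iff, decide_eq_false_iff_not, Char.le_def, UInt32.le_iff_toNat_le] at *
  simp only [show ('0'.val.toNat = 48) from rfl, show ('9'.val.toNat = 57) from rfl,
    show ('A'.val.toNat = 65) from rfl, show ('Z'.val.toNat = 90) from rfl,
    show ('a'.val.toNat = 97) from rfl, show ('z'.val.toNat = 122) from rfl] at *
  omega

-- loop invariant: pvLoopA carries the two flags; its result is the all/any formula seeded with them
theorem pvLoopA_eq (cs : List Char) (hl hn : Bool) :
    pvLoopA cs hl hn =
      (cs.all PySem.Chars.isalnum && (hl || cs.any PySem.Chars.isalpha)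
        && (hn || cs.any (fun c => PySem.Chars.isalnum c && !PySem.Chars.isalpha c && PySem.Chars.isdigit c))) := by
  induction cs generalizing hl hn with
  | nil => simp [pvLoopA]
  | cons x xs ih =>
    simp only [pvLoopA, List.all_cons, List.any_cons]
    split_ifs with h1 h2 h3
    · simp [ih, h1, h2]
    · simp [ih, h1, h2, h3]
    · simp [ih, h1, h2, h3]
    · simp [h1]

theorem Authenitcate_Password_spec : Claim_equal_Authenitcate_Password := by
  intro input _
  unfold Spec_Authenitcate_Password Authenitcate_Password Authenitcate_Password_alt
  rw [pvLoopA_eq]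
  simp only [Bool.false_or]
  rcases h : input.toList.all PySem.Chars.isalnum with _ | _
  · simp
  · simp only [List.all_eq_true] at h
    congr 1
    rw [Bool.eq_iff_iff]
    simp only [List.any_eq_true]
    constructor
    · rintro ⟨c, hc, hf⟩
      exact ⟨c, hc, by simp at hf; exact hf.2⟩
    · rintro ⟨c, hc, hd⟩
      refine ⟨c, hc, ?_⟩
      have h1 := h c hc
      by_cases h2 : PySem.Chars.isalpha c = true
      · -- an ASCII digit is never a letter
        rw [pv_not_digit_of_alpha c h2] at hd; exact absurd hd (by simp)
      · simp [h1, hd, Bool.eq_false_iff.mpr h2]
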